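-- pv_equiv track=rewrite | github.com/DHRUVSHARM/Python_problems | integers_with_multiple_sum_of_2_cubes.py | findGoodIntegers
-- ===== SOURCE A (Python) =====
-- import collections
--
-- def findGoodIntegers(n: int) -> list[int]:
--
--     result , pair_count = [] , collections.defaultdict(int)
--
--     for a in range(1 , n):
--         if a**3 > n:
--             break
--         for b in range(a + 1 , n):
--             num = a**3 + b**3
--             if num > n:
--                 break
--
--             if num in pair_count and pair_count[num] == 1:
--                 result.append(num)
--
--             pair_count[num] += 1
--
--     result.sort()
--     return result
-- ===== SOURCE B (Python) =====
-- import collections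
--
-- def findGoodIntegers(n: int) -> list[int]:
--     # Collect every pair sum first, then sort and scan runs for values
--     # that occur at least twice.
--     sums = collections.deque()
--     for a in range(1, n):
--         if a ** 3 > n:
--             break
--         for b in range(a + 1, n):
--             num = a ** 3 + b ** 3
--             if num > n:
--                 break
--             sums.appendleft(num)
--     ordered = sorted(sums)
--     result = []
--     run_val, run_len = None, 0
--     for v in ordered:
--         if run_val == v:
--             run_len += 1
--             if run_len == 2:
--                 result.append(v)
--         else:
--             run_val, run_len = v, 1
--     return result
-- ===== Notes on version B (the rewrite author's own statement) =====
-- stated objective: alternative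
-- what changed: Instead of counting representations in a dict and appending a number the moment its count hits two, B collects every pair sum into a deque, sorts the sums, and scans the runs of the sorted list for values occurring at least twice.
import Mathlib
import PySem

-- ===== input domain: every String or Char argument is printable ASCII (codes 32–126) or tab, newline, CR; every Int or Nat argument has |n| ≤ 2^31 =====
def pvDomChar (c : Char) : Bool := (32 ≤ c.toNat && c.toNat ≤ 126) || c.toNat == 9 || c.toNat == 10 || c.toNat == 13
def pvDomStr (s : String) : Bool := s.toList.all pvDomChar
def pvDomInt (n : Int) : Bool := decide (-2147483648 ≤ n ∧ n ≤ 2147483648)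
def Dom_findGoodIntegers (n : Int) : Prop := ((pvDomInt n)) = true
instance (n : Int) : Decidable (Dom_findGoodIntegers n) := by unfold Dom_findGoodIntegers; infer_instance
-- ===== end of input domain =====

-- B replaces A's dict-counting with inline second-representation detection by a different
-- algorithm: collect all pair sums, sort them, and scan the runs for values occurring twice.

-- ===== PORT A =====
-- inner 'for b in range(a+1, n)' loop as a counter while-loop (early break on num > n)
def pvInnerA (n a b : Int) (res : List Int) (pc : PySem.Dict Int Int) :
    List Int × PySem.Dict Int Int :=
  if _h : b < n then
    if a ^ 3 + b ^ 3 > n then (res, pc)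
    else
      pvInnerA n a (b + 1)
        (if pc.contains (a ^ 3 + b ^ 3) = true ∧ pc.getD (a ^ 3 + b ^ 3) 0 = 1
         then res ++ [a ^ 3 + b ^ 3] else res)
        (pc.insert (a ^ 3 + b ^ 3) (pc.getD (a ^ 3 + b ^ 3) 0 + 1))
  else (res, pc)
termination_by (n - b).toNat
decreasing_by omega

-- outer 'for a in range(1, n)' loop (early break on a**3 > n)
def pvOuterA (n a : Int) (res : List Int) (pc : PySem.Dict Int Int) :
    List Int × PySem.Dict Int Int :=
  if _h : a < n then
    if a ^ 3 > n then (res, pc)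
    else
      let st := pvInnerA n a (a + 1) res pc
      pvOuterA n (a + 1) st.1 st.2
  else (res, pc)
termination_by (n - a).toNat
decreasing_by omega

def findGoodIntegers (n : Int) : List Int :=
  PySem.List.sorted (pvOuterA n 1 [] PySem.Dict.empty).1 (fun x => x) false

-- ===== PORT B =====
-- same pair enumeration, but only prepends each sum to the deque (appendleft = cons)
def pvInnerB (n a b : Int) (sums : List Int) : List Int :=
  if _h : b < n then
    if a ^ 3 + b ^ 3 > n then sums
    else pvInnerB n a (b + 1) ((a ^ 3 + b ^ 3) :: sums)
  else sums
termination_by (n - b).toNat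
decreasing_by omega

def pvOuterB (n a : Int) (sums : List Int) : List Int :=
  if _h : a < n then
    if a ^ 3 > n then sums
    else pvOuterB n (a + 1) (pvInnerB n a (a + 1) sums)
  else sums
termination_by (n - a).toNat
decreasing_by omega

-- body of B's 'for v in ordered' run-scanning loop
def pvRunStep (st : List Int × Option Int × Int) (v : Int) : List Int × Option Int × Int :=
  if st.2.1 == some v then
    (if st.2.2 + 1 = 2 then st.1 ++ [v] else st.1, st.2.1, st.2.2 + 1)
  else (st.1, some v, 1)

def findGoodIntegers_alt (n : Int) : List Int :=
  let sums := pvOuterB n 1 []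
  let ordered := sums.mergeSort (fun x y => decide (x ≤ y))  -- Python's sorted(sums)
  (ordered.foldl pvRunStep ([], none, 0)).1

-- ===== PRECONDITION & SPEC =====
def Spec_findGoodIntegers (n : Int) (out : List Int) : Prop := out = findGoodIntegers_alt n
instance (n : Int) (out : List Int) : Decidable (Spec_findGoodIntegers n out) := by unfold Spec_findGoodIntegers; infer_instance

-- ===== CLAIM (what is proved, stated in full; the proofs are below) =====
def Claim_equal_findGoodIntegers : Prop := ∀ (n : Int), Dom_findGoodIntegers n → Spec_findGoodIntegers n (findGoodIntegers n)

-- ===== LEMMAS AND PROOFS =====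

-- loop invariant coupling A's state (res, pc) with B's collected sums:
-- res holds, without duplicates, exactly the values seen at least twice,
-- and the dict stores exactly the multiplicities of the collected sums
def pvInv (res sums : List Int) (pc : PySem.Dict Int Int) : Prop :=
  res.Nodup ∧ (∀ x : Int, x ∈ res ↔ 2 ≤ sums.count x) ∧
    ∀ x : Int, pc.getD x 0 = (sums.count x : Int)

-- one iteration preserves the invariant
theorem pvInv_step (res sums : List Int) (pc : PySem.Dict Int Int) (num : Int)
    (h : pvInv res sums pc) :
    pvInv (if pc.contains num = true ∧ pc.getD num 0 = 1 then res ++ [num] else res)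
      (num :: sums) (pc.insert num (pc.getD num 0 + 1)) := by
  obtain ⟨hnd, hmem, hcnt⟩ := h
  have hc : (pc.contains num = true ∧ pc.getD num 0 = 1) ↔ sums.count num = 1 := by
    constructor
    · intro hh
      have := hcnt num
      omega
    · intro h1
      refine ⟨?_, by rw [hcnt num]; omega⟩
      by_contra hcon
      have hf : pc.contains num = false := by
        cases hcc : pc.contains num
        · rfl
        · exact absurd hcc hcon
      have := PySem.Dict.getD_of_not_contains pc (k := num) 0 hf
      have := hcnt num
      omega
  refine ⟨?_, ?_, ?_⟩
  · split_ifs with hif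
    · have h1 : sums.count num = 1 := hc.mp hif
      have hnm : num ∉ res := fun hm => by have := (hmem num).mp hm; omega
      refine hnd.append (List.nodup_singleton _) ?_
      intro x hx hx2
      rw [List.mem_singleton] at hx2
      subst hx2
      exact hnm hx
    · exact hnd
  · intro x
    by_cases hx : x = num
    · subst hx
      have hcx : (x :: sums).count x = sums.count x + 1 := by simp
      split_ifs with hif
      · have h1 : sums.count x = 1 := hc.mp hif
        simp only [List.mem_append, List.mem_singleton]
        rw [hcx]
        constructor
        · intro _; omega
        · intro _; simp
      · have h1 : sums.count x ≠ 1 := fun hh => hif (hc.mpr hh)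
        rw [hcx]
        have hm := hmem x
        constructor
        · intro hmm; have := hm.mp hmm; omega
        · intro hg; exact hm.mpr (by omega)
    · have hnx : ¬ num = x := fun hh => hx hh.symm
      have hcx : (num :: sums).count x = sums.count x := by
        simp [hnx]
      split_ifs with hif
      · simp only [List.mem_append, List.mem_singleton, hx, or_false]
        rw [hcx]; exact hmem x
      · rw [hcx]; exact hmem x
  · intro x
    rw [PySem.Dict.getD_insert]
    by_cases hx : x = num
    · subst hx
      rw [if_pos rfl, hcnt x]
      simp
    · have hnx : ¬ num = x := fun hh => hx hh.symm
      rw [if_neg hx, hcnt x]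
      have hcx : (num :: sums).count x = sums.count x := by
        simp [hnx]
      rw [hcx]

-- coupling of the two inner loops (same counters, same break conditions)
theorem pvInnerAB (n a b : Int) (res sums : List Int) (pc : PySem.Dict Int Int)
    (h : pvInv res sums pc) :
    pvInv (pvInnerA n a b res pc).1 (pvInnerB n a b sums) (pvInnerA n a b res pc).2 := by
  rw [pvInnerA, pvInnerB]
  by_cases hb : b < n
  · rw [dif_pos hb, dif_pos hb]
    by_cases hnum : a ^ 3 + b ^ 3 > n
    · rw [if_pos hnum, if_pos hnum]
      exact h
    · rw [if_neg hnum, if_neg hnum]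
      exact pvInnerAB n a (b + 1) _ _ _ (pvInv_step res sums pc _ h)
  · rw [dif_neg hb, dif_neg hb]
    exact h
termination_by (n - b).toNat
decreasing_by omega

-- coupling of the two outer loops
theorem pvOuterAB (n a : Int) (res sums : List Int) (pc : PySem.Dict Int Int)
    (h : pvInv res sums pc) :
    pvInv (pvOuterA n a res pc).1 (pvOuterB n a sums) (pvOuterA n a res pc).2 := by
  rw [pvOuterA, pvOuterB]
  by_cases ha : a < n
  · rw [dif_pos ha, dif_pos ha]
    by_cases hcube : a ^ 3 > n
    · rw [if_pos hcube, if_pos hcube]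
      exact h
    · rw [if_neg hcube, if_neg hcube]
      exact pvOuterAB n (a + 1) _ _ _ (pvInnerAB n a (a + 1) res sums pc h)
  · rw [dif_neg ha, dif_neg ha]
    exact h
termination_by (n - a).toNat
decreasing_by omega

-- the run-scanning fold on a sorted tail: it appends exactly the values reaching
-- multiplicity two, in strictly increasing order
theorem pvRunFold (l : List Int) : ∀ (res : List Int) (p k : Int),
    l.Pairwise (· ≤ ·) → (∀ y ∈ l, p ≤ y) → 1 ≤ k →
    ∃ E, (l.foldl pvRunStep (res, some p, k)).1 = res ++ E ∧
      (∀ x, x ∈ E ↔ ((x = p ∧ k = 1 ∧ 1 ≤ l.count p) ∨ (x ≠ p ∧ x ∈ l ∧ 2 ≤ l.count x))) ∧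
      E.Pairwise (· < ·) ∧ (∀ x ∈ E, p ≤ x) := by
  induction l with
  | nil =>
      intro res p k _ _ _
      refine ⟨[], by simp, ?_, List.Pairwise.nil, by simp⟩
      intro x
      simp
  | cons v t ih =>
      intro res p k hpw hlb hk
      obtain ⟨hvle, hpwt⟩ := List.pairwise_cons.mp hpw
      have hpv : p ≤ v := hlb v (List.mem_cons_self ..)
      rw [List.foldl_cons]
      by_cases heq : p = v
      · subst heq
        rw [show pvRunStep (res, some p, k) p =
            (if k + 1 = 2 then res ++ [p] else res, some p, k + 1) from by simp [pvRunStep]]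
        by_cases hk1 : k = 1
        · rw [if_pos (by omega)]
          obtain ⟨E', hE'eq, hE'mem, hE'pw, hE'lb⟩ :=
            ih (res ++ [p]) p (k + 1) hpwt hvle (by omega)
          have hE'ne : ∀ x ∈ E', x ≠ p := by
            intro x hx
            rcases (hE'mem x).mp hx with ⟨_, h2, _⟩ | ⟨hne, _, _⟩
            · omega
            · exact hne
          refine ⟨p :: E', by simpa using hE'eq, ?_, ?_, ?_⟩
          · intro x
            simp only [List.mem_cons, hE'mem x]
            by_cases hxp : x = p
            · subst hxp
              simp [hk1]
            · have hpx : ¬ p = x := fun hh => hxp hh.symm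
              have hcx : (p :: t).count x = t.count x := by simp [hpx]
              have hk2 : ¬ (k + 1 = 1) := by omega
              simp [hxp, hcx, hk2]
          · rw [List.pairwise_cons]
            refine ⟨?_, hE'pw⟩
            intro x hx
            exact lt_of_le_of_ne (hE'lb x hx) (fun hh => hE'ne x hx hh.symm)
          · intro x hx
            rcases List.mem_cons.mp hx with rfl | hx'
            · exact le_refl _
            · exact hE'lb x hx'
        · rw [if_neg (by omega)]
          obtain ⟨E', hE'eq, hE'mem, hE'pw, hE'lb⟩ := ih res p (k + 1) hpwt hvle (by omega)
          refine ⟨E', hE'eq, ?_, hE'pw, hE'lb⟩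
          intro x
          rw [hE'mem x]
          by_cases hxp : x = p
          · subst hxp
            have hk2 : ¬ (k + 1 = 1) := by omega
            simp [hk1, hk2]
          · have hpx : ¬ p = x := fun hh => hxp hh.symm
            have hcx : (p :: t).count x = t.count x := by simp [hpx]
            have hk2 : ¬ (k + 1 = 1) := by omega
            simp [hxp, hcx, hk2]
      · have hplt : p < v := lt_of_le_of_ne hpv heq
        rw [show pvRunStep (res, some p, k) v = (res, some v, 1) from by simp [pvRunStep, heq]]
        obtain ⟨E', hE'eq, hE'mem, hE'pw, hE'lb⟩ := ih res v 1 hpwt hvle (le_refl 1)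
        have hpt : t.count p = 0 := by
          rw [List.count_eq_zero]
          intro hmt
          exact absurd (hvle p hmt) (by omega)
        have hvp : ¬ v = p := fun hh => heq hh.symm
        refine ⟨E', hE'eq, ?_, hE'pw, ?_⟩
        · intro x
          rw [hE'mem x]
          by_cases hxv : x = v
          · subst hxv
            have hcx : (x :: t).count x = t.count x + 1 := by simp
            simp [hvp, hcx]
          · have hvx : ¬ v = x := fun hh => hxv hh.symm
            have hcx : (v :: t).count x = t.count x := by simp [hvx]
            by_cases hxp : x = p
            · subst hxp
              have hxt : x ∉ t := List.count_eq_zero.mp hpt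
              simp [hxv, hxt, hcx, hpt]
            · simp [hxv, hxp, hcx, List.mem_cons]
        · intro x hx
          exact le_of_lt (lt_of_lt_of_le hplt (hE'lb x hx))

-- the whole run-scanning pass on a sorted list returns, in strictly increasing
-- order, exactly the values occurring at least twice
theorem pvRunFold_top (l : List Int) (hl : l.Pairwise (· ≤ ·)) :
    (∀ x, x ∈ (l.foldl pvRunStep ([], none, 0)).1 ↔ 2 ≤ l.count x) ∧
    (l.foldl pvRunStep ([], none, 0)).1.Pairwise (· < ·) := by
  cases l with
  | nil => exact ⟨by simp, List.Pairwise.nil⟩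
  | cons v t =>
      obtain ⟨hvle, hpwt⟩ := List.pairwise_cons.mp hl
      rw [List.foldl_cons]
      rw [show pvRunStep ([], none, 0) v = ([], some v, 1) from by simp [pvRunStep]]
      obtain ⟨E, hEeq, hEmem, hEpw, hElb⟩ := pvRunFold t [] v 1 hpwt hvle (le_refl 1)
      rw [hEeq]
      simp only [List.nil_append]
      refine ⟨?_, hEpw⟩
      intro x
      rw [hEmem x]
      by_cases hxv : x = v
      · subst hxv
        have hcx : (x :: t).count x = t.count x + 1 := by simp
        rw [hcx]
        constructor
        · rintro (⟨_, _, hc⟩ | ⟨hne, _, _⟩)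
          · omega
          · exact absurd rfl hne
        · intro hcc
          exact Or.inl ⟨rfl, rfl, by omega⟩
      · have hvx : ¬ v = x := fun hh => hxv hh.symm
        have hcx : (v :: t).count x = t.count x := by simp [hvx]
        rw [hcx]
        constructor
        · rintro (⟨hx1, _, _⟩ | ⟨_, _, hct⟩)
          · exact absurd hx1 hxv
          · exact hct
        · intro hcc
          exact Or.inr ⟨hxv, List.count_pos_iff.mp (by omega), hcc⟩

-- ===== VERDICT (by name: the statement is the Claim_ definition above) =====
theorem findGoodIntegers_spec : Claim_equal_findGoodIntegers := by
  intro n _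
  unfold Spec_findGoodIntegers findGoodIntegers findGoodIntegers_alt
  have hinv0 : pvInv [] [] PySem.Dict.empty := by
    refine ⟨List.nodup_nil, by simp, ?_⟩
    intro x
    simp [PySem.Dict.getD_empty]
  obtain ⟨hnd, hmem, -⟩ := pvOuterAB n 1 [] [] PySem.Dict.empty hinv0
  have hperm : ((pvOuterB n 1 []).mergeSort (fun x y => decide (x ≤ y))).Perm
      (pvOuterB n 1 []) := List.mergeSort_perm _ _
  have hsorted : ((pvOuterB n 1 []).mergeSort (fun x y => decide (x ≤ y))).Pairwise
      (· ≤ ·) := by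
    have := List.pairwise_mergeSort (le := fun x y : Int => decide (x ≤ y))
      (by intro a b c hab hbc; simp at hab hbc ⊢; omega)
      (by intro a b; simp; omega) (pvOuterB n 1 [])
    exact this.imp (by intro a b h; simpa using h)
  obtain ⟨hFmem, hFpw⟩ := pvRunFold_top _ hsorted
  have hFnd : ((((pvOuterB n 1 []).mergeSort (fun x y => decide (x ≤ y))).foldl
      pvRunStep ([], none, 0)).1).Nodup := hFpw.imp (fun h => ne_of_lt h)
  have hpermRF : ((((pvOuterB n 1 []).mergeSort (fun x y => decide (x ≤ y))).foldl
      pvRunStep ([], none, 0)).1).Perm (pvOuterA n 1 [] PySem.Dict.empty).1 := by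
    rw [List.perm_ext_iff_of_nodup hFnd hnd]
    intro x
    rw [hFmem x, hperm.count_eq, hmem x]
  exact PySem.List.sorted_eq_of_perm_of_pairwise_lt _ _ (fun x => x) hpermRF hFpw
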